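-- pv_equiv track=rewrite | github.com/xuwd11/Coursera_Data_Structures_and_Algorithms_Specialization | Course5_Advanced_Algorithms_and_Complexity/Assignments/_PA4_reschedule_exams.py | search
-- ===== SOURCE A (Python) =====
-- forward = 1     # traversing edge (v,w) from v to w
--
-- reverse = -1    # returning backwards on (v,w) from w to v
--
-- nontree = 0     # edge (v,w) is not part of the DFS tree
--
-- def search(G):
--     """
--     Generate sequence of triples (v,w,edgetype) for DFS of graph G.
--     The subsequence for each root of each tree in the DFS forest starts
--     with (root,root,forward) and ends with (root,root,reverse).
--     If the initial vertex is given, it is used as the root and vertices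
--     not reachable from it are not searched.
--     """
--     visited = set()
--
--     for v in range(len(G)):
--         if v not in visited:
--             yield v,v,forward
--             visited.add(v)
--             stack = [(v,iter(G[v]))]
--             while stack:
--                 parent,children = stack[-1]
--                 try:
--                     child = next(children)
--                     if child in visited:
--                         yield parent,child,nontree
--                     else:
--                         yield parent,child,forward
--                         visited.add(child)
--                         stack.append((child,iter(G[child])))
--                 except StopIteration:
--                     stack.pop()
--                     if stack:
--                         yield stack[-1][0],parent,reverse
--             yield v,v,reverse
-- ===== SOURCE B (Python) =====
-- forward = 1     # traversing edge (v,w) from v to w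
-- reverse = -1    # returning backwards on (v,w) from w to v
-- nontree = 0     # edge (v,w) is not part of the DFS tree
--
-- def search(G):
--     """Recursive-generator DFS producing the same (v,w,edgetype) triples."""
--     visited = set()
--
--     def dfs(v):
--         for w in G[v]:
--             if w in visited:
--                 yield v, w, nontree
--             else:
--                 yield v, w, forward
--                 visited.add(w)
--                 yield from dfs(w)
--                 yield v, w, reverse
--
--     for v in range(len(G)):
--         if v not in visited:
--             yield v, v, forward
--             visited.add(v)
--             yield from dfs(v)
--             yield v, v, reverse
-- ===== Notes on version B (the rewrite author's own statement) =====
-- stated objective: simpler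
-- what changed: The explicit stack of (vertex, iterator) pairs with try/except StopIteration is replaced by a recursive generator helper dfs(v) using `yield from`, so the call stack carries the traversal state.
import Mathlib
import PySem

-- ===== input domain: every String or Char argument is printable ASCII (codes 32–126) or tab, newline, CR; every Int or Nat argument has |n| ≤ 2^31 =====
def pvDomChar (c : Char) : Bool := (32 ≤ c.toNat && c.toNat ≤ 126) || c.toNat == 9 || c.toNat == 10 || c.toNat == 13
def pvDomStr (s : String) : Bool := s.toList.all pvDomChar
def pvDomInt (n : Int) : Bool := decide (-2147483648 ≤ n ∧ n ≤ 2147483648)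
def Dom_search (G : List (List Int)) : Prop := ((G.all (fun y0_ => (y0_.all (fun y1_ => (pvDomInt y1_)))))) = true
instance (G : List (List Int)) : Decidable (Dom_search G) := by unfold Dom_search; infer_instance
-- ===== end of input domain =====

-- B is a recursive-generator decomposition of A's explicit-stack DFS; same triples, same order (equal return value; neither mutates its argument).

-- number of still-unvisited candidate vertex values in [-n, n): the termination measure shared by both ports
def pvUnvis (n : Nat) (vis : PySem.Set Int) : Nat :=
  ((List.range (2 * n)).filter (fun (i : Nat) => !(PySem.Set.contains vis ((i : Int) - n)))).length

theorem pvFilter_lt {α : Type} (p q : α → Bool) (himp : ∀ a, q a = true → p a = true)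
    (l : List α) (x : α) (hx : x ∈ l) (hpx : p x = true) (hqx : q x = false) :
    (l.filter q).length < (l.filter p).length := by
  induction l with
  | nil => cases hx
  | cons a l ih =>
    rcases List.mem_cons.mp hx with rfl | hx'
    · have hle := (List.monotone_filter_right l himp).length_le
      simp [hqx, hpx]
      omega
    · have hlt := ih hx'
      rcases hq : q a with _ | _
      · rcases hp : p a with _ | _ <;> simp [hq, hp] <;> omega
      · have hp := himp a hq
        simp [hq, hp]
        omega

theorem pvContains_add_mono (vis : PySem.Set Int) (c x : Int)
    (h : PySem.Set.contains vis x = true) : PySem.Set.contains (PySem.Set.add vis c) x = true :=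
  (PySem.Set.contains_iff _ _).mpr ((PySem.Set.mem_add _ _ _).mpr (Or.inl ((PySem.Set.contains_iff _ _).mp h)))

theorem pvUnvis_himp (n : Nat) (vis : PySem.Set Int) (c : Int) :
    ∀ a : Nat, (!(PySem.Set.contains (PySem.Set.add vis c) ((a : Int) - n))) = true →
      (!(PySem.Set.contains vis ((a : Int) - n))) = true := by
  intro a ha
  rw [Bool.not_eq_true'] at ha ⊢
  rcases h : PySem.Set.contains vis ((a : Int) - n) with _ | _
  · rfl
  · rw [pvContains_add_mono vis c _ h] at ha
    cases ha

theorem pvUnvis_add_le (n : Nat) (vis : PySem.Set Int) (c : Int) :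
    pvUnvis n (PySem.Set.add vis c) ≤ pvUnvis n vis := by
  unfold pvUnvis
  exact (List.monotone_filter_right _ (pvUnvis_himp n vis c)).length_le

theorem pvUnvis_add_lt (n : Nat) (vis : PySem.Set Int) (c : Int)
    (hnc : ¬ PySem.Set.contains vis c = true)
    (h1 : -(n : Int) ≤ c) (h2 : c < (n : Int)) :
    pvUnvis n (PySem.Set.add vis c) < pvUnvis n vis := by
  unfold pvUnvis
  have hi0v : (((c + n).toNat : Int)) - n = c := by omega
  refine pvFilter_lt _ _ (pvUnvis_himp n vis c) _ ((c + n).toNat) ?_ ?_ ?_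
  · rw [List.mem_range]; omega
  · rw [hi0v, Bool.not_eq_true']
    rcases h : PySem.Set.contains vis c with _ | _
    · rfl
    · exact absurd h hnc
  · rw [hi0v]
    have : PySem.Set.contains (PySem.Set.add vis c) c = true :=
      (PySem.Set.contains_iff _ _).mpr ((PySem.Set.mem_add _ _ _).mpr (Or.inr rfl))
    rw [this]
    rfl

theorem pvInRange_of_pyGet?_some {α : Type} (xs : List α) (i : Int) (r : α)
    (h : PySem.List.pyGet? xs i = some r) : -(xs.length : Int) ≤ i ∧ i < (xs.length : Int) := by
  have hne : ¬ PySem.List.pyGet? xs i = none := by rw [h]; simp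
  rw [PySem.List.pyGet?_eq_none_iff, not_not] at hne
  simpa [PySem.Raise.InRange] using hne

-- ===== PORT A =====
-- the while-loop over the explicit stack of (parent, remaining-children) pairs
def loopA (G : List (List Int)) (stack : List (Int × List Int)) (vis : PySem.Set Int) :
    List (Int × Int × Int) × PySem.Set Int :=
  match stack with
  | [] => ([], vis)
  | (parent, cs) :: tail =>
    match cs with
    | [] =>  -- StopIteration: pop; if the stack is nonempty, yield (stack[-1][0], parent, reverse)
      match tail with
      | [] => ([], vis)
      | (gp, gcs) :: ttail =>
        let r := loopA G ((gp, gcs) :: ttail) vis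
        ((gp, parent, -1) :: r.1, r.2)
    | c :: rest =>
      if PySem.Set.contains vis c then
        let r := loopA G ((parent, rest) :: tail) vis
        ((parent, c, 0) :: r.1, r.2)
      else
        match h : PySem.List.pyGet? G c with
        | none => ([(parent, c, 1)], PySem.Set.add vis c)  -- Python raises IndexError here (outside Pre_)
        | some row =>
          let r := loopA G ((c, row) :: (parent, rest) :: tail) (PySem.Set.add vis c)
          ((parent, c, 1) :: r.1, r.2)
  termination_by (pvUnvis G.length vis, (stack.map (fun pc => pc.2.length)).sum + stack.length)
  decreasing_by
  · apply Prod.Lex.right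
    simp
  · apply Prod.Lex.right
    simp
  · apply Prod.Lex.left
    have hb := pvInRange_of_pyGet?_some G c row h
    exact pvUnvis_add_lt G.length vis c (by simpa using ‹¬ PySem.Set.contains vis c = true›) hb.1 hb.2

-- the outer 'for v in range(len(G))' loop
def outerA (G : List (List Int)) (vs : List Int) (vis : PySem.Set Int) : List (Int × Int × Int) :=
  match vs with
  | [] => []
  | v :: rest =>
    if PySem.Set.contains vis v then outerA G rest vis
    else
      let r := loopA G [(v, (PySem.List.pyGet? G v).getD [])] (PySem.Set.add vis v)
      (v, v, 1) :: (r.1 ++ (v, v, -1) :: outerA G rest r.2)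

def search (G : List (List Int)) : List (Int × Int × Int) :=
  outerA G (PySem.List.pyRange 0 G.length 1) PySem.Set.empty

-- ===== PORT B =====
-- the recursive generator dfs(v): processes the remaining children cs of parent p,
-- returning the yielded triples and the updated visited set (bounded, for termination)
def dfsB (G : List (List Int)) (p : Int) (cs : List Int) (vis : PySem.Set Int) :
    List (Int × Int × Int) × {v : PySem.Set Int // pvUnvis G.length v ≤ pvUnvis G.length vis} :=
  match cs with
  | [] => ([], ⟨vis, Nat.le_refl _⟩)
  | c :: rest =>
    if PySem.Set.contains vis c then
      let r := dfsB G p rest vis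
      ((p, c, 0) :: r.1, r.2)
    else
      match h : PySem.List.pyGet? G c with
      | none => ([(p, c, 1)], ⟨PySem.Set.add vis c, pvUnvis_add_le _ _ _⟩)  -- Python raises IndexError here (outside Pre_)
      | some row =>
        let inner := dfsB G c row (PySem.Set.add vis c)
        let outer := dfsB G p rest inner.2.val
        ((p, c, 1) :: (inner.1 ++ (p, c, -1) :: outer.1),
         ⟨outer.2.val, Nat.le_trans outer.2.property (Nat.le_trans inner.2.property (pvUnvis_add_le _ _ _))⟩)
  termination_by (pvUnvis G.length vis, cs.length)
  decreasing_by
  · apply Prod.Lex.right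
    simp
  · apply Prod.Lex.left
    have hb := pvInRange_of_pyGet?_some G c row h
    exact pvUnvis_add_lt G.length vis c (by simpa using ‹¬ PySem.Set.contains vis c = true›) hb.1 hb.2
  · apply Prod.Lex.left
    have hb := pvInRange_of_pyGet?_some G c row h
    exact Nat.lt_of_le_of_lt inner.2.property
      (pvUnvis_add_lt G.length vis c (by simpa using ‹¬ PySem.Set.contains vis c = true›) hb.1 hb.2)

def outerB (G : List (List Int)) (vs : List Int) (vis : PySem.Set Int) : List (Int × Int × Int) :=
  match vs with
  | [] => []
  | v :: rest =>
    if PySem.Set.contains vis v then outerB G rest vis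
    else
      let r := dfsB G v ((PySem.List.pyGet? G v).getD []) (PySem.Set.add vis v)
      (v, v, 1) :: (r.1 ++ (v, v, -1) :: outerB G rest r.2.val)

def search_alt (G : List (List Int)) : List (Int × Int × Int) :=
  outerB G (PySem.List.pyRange 0 G.length 1) PySem.Set.empty

-- ===== PRECONDITION & SPEC =====
-- Pre_ excludes graphs with an edge target outside [-len(G), len(G)): on its first visit such a
-- target makes the Python A (and B) raise IndexError at G[child].
def Pre_search (G : List (List Int)) : Prop :=
  ∀ row ∈ G, ∀ c ∈ row, -(G.length : Int) ≤ c ∧ c < (G.length : Int)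
instance (G : List (List Int)) : Decidable (Pre_search G) := by unfold Pre_search; infer_instance

def pvWitness_search : List (List Int) := [[1, 0, -1], [1], []]

def Spec_search (G : List (List Int)) (out : List (Int × Int × Int)) : Prop := out = search_alt G
instance (G : List (List Int)) (out : List (Int × Int × Int)) : Decidable (Spec_search G out) := by unfold Spec_search; infer_instance

-- ===== CLAIM (what is proved, stated in full; the proofs are below) =====
def Claim_equal_search : Prop := ∀ (G : List (List Int)), Dom_search G → Pre_search G → Spec_search G (search G)

-- ===== LEMMAS AND PROOFS =====

-- one-step reduction lemmas for the push branch (the dependent match on pyGet? needs them)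
theorem loopA_push (G : List (List Int)) (p c : Int) (rest : List Int)
    (tail : List (Int × List Int)) (vis : PySem.Set Int)
    (hcf : PySem.Set.contains vis c = false) (row : List Int)
    (hg : PySem.List.pyGet? G c = some row) :
    loopA G ((p, c :: rest) :: tail) vis =
      ((p, c, 1) :: (loopA G ((c, row) :: (p, rest) :: tail) (PySem.Set.add vis c)).1,
       (loopA G ((c, row) :: (p, rest) :: tail) (PySem.Set.add vis c)).2) := by
  rw [loopA]
  simp only [hcf, Bool.false_eq_true, if_false]
  split
  · rename_i heq
    rw [hg] at heq
    cases heq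
  · rename_i r heq
    rw [hg] at heq
    injection heq with h2
    subst h2
    rfl

theorem dfsB_push_fst (G : List (List Int)) (p c : Int) (rest : List Int) (vis : PySem.Set Int)
    (hcf : PySem.Set.contains vis c = false) (row : List Int)
    (hg : PySem.List.pyGet? G c = some row) :
    (dfsB G p (c :: rest) vis).1 =
      (p, c, 1) :: ((dfsB G c row (PySem.Set.add vis c)).1 ++
        (p, c, -1) :: (dfsB G p rest (dfsB G c row (PySem.Set.add vis c)).2.val).1) := by
  rw [dfsB]
  simp only [hcf, Bool.false_eq_true, if_false]
  split
  · rename_i heq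
    rw [hg] at heq
    cases heq
  · rename_i r heq
    rw [hg] at heq
    injection heq with h2
    subst h2
    rfl

theorem dfsB_push_snd (G : List (List Int)) (p c : Int) (rest : List Int) (vis : PySem.Set Int)
    (hcf : PySem.Set.contains vis c = false) (row : List Int)
    (hg : PySem.List.pyGet? G c = some row) :
    (dfsB G p (c :: rest) vis).2.val =
      (dfsB G p rest (dfsB G c row (PySem.Set.add vis c)).2.val).2.val := by
  rw [dfsB]
  simp only [hcf, Bool.false_eq_true, if_false]
  split
  · rename_i heq
    rw [hg] at heq
    cases heq
  · rename_i r heq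
    rw [hg] at heq
    injection heq with h2
    subst h2
    rfl

-- the stack-based loop is: the recursive dfs of the top frame, then the pop-yield, then the rest of the stack
theorem loopA_eq_dfsB (G : List (List Int)) (hPre : Pre_search G) :
    ∀ (p : Int) (cs : List Int) (vis : PySem.Set Int) (tail : List (Int × List Int)),
      (∀ c ∈ cs, -(G.length : Int) ≤ c ∧ c < (G.length : Int)) →
      loopA G ((p, cs) :: tail) vis =
        ((dfsB G p cs vis).1 ++
           (match tail with | [] => [] | (gp, _) :: _ => [(gp, p, -1)]) ++
           (loopA G tail (dfsB G p cs vis).2.val).1,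
         (loopA G tail (dfsB G p cs vis).2.val).2) := by
  intro p cs vis
  induction p, cs, vis using dfsB.induct G with
  | case1 p vis =>
    intro tail _
    rcases tail with _ | ⟨⟨gp, gcs⟩, tt⟩
    · simp [loopA, dfsB]
    · simp [loopA, dfsB]
  | case2 p vis c rest hc ih =>
    intro tail hcs
    have hrest : ∀ x ∈ rest, -(G.length : Int) ≤ x ∧ x < (G.length : Int) :=
      fun x hx => hcs x (List.mem_cons_of_mem _ hx)
    rw [loopA]
    simp only [hc, if_true, ih tail hrest]
    have hc' : c ∈ vis := (PySem.Set.contains_iff _ _).mp hc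
    rw [dfsB]
    simp [hc']
  | case3 p vis c rest hc hg =>
    intro tail hcs
    exfalso
    have hb := hcs c (by simp)
    rw [PySem.List.pyGet?_eq_none_iff] at hg
    unfold PySem.Raise.InRange at hg
    exact hg ⟨hb.1, hb.2⟩
  | case4 p vis c rest hc row hg inner ih1 ih2 ih3 =>
    intro tail hcs
    have hrow : ∀ x ∈ row, -(G.length : Int) ≤ x ∧ x < (G.length : Int) :=
      fun x hx => hPre row (PySem.List.mem_of_pyGet?_eq_some G hg) x hx
    have hrest : ∀ x ∈ rest, -(G.length : Int) ≤ x ∧ x < (G.length : Int) :=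
      fun x hx => hcs x (List.mem_cons_of_mem _ hx)
    have hcf : vis.contains c = false := by simpa using hc
    clear ih2
    rw [loopA_push G p c rest tail vis hcf row hg]
    rw [ih1 ((p, rest) :: tail) hrow]
    rw [ih3 tail hrest]
    rw [dfsB_push_fst G p c rest vis hcf row hg, dfsB_push_snd G p c rest vis hcf row hg]
    simp

theorem outerA_eq_outerB (G : List (List Int)) (hPre : Pre_search G) :
    ∀ (vs : List Int) (vis : PySem.Set Int), outerA G vs vis = outerB G vs vis := by
  intro vs
  induction vs with
  | nil => intro vis; simp [outerA, outerB]
  | cons v rest ih =>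
    intro vis
    by_cases hv : v ∈ vis
    · simp [outerA, outerB, hv, ih]
    · have hcs : ∀ c ∈ (PySem.List.pyGet? G v).getD [],
          -(G.length : Int) ≤ c ∧ c < (G.length : Int) := by
        rcases hg : PySem.List.pyGet? G v with _ | row
        · simp
        · intro c hcm
          exact hPre row (PySem.List.mem_of_pyGet?_eq_some G hg) c (by simpa using hcm)
      have h1 := loopA_eq_dfsB G hPre v ((PySem.List.pyGet? G v).getD [])
        (PySem.Set.add vis v) [] hcs
      simp only [outerA, outerB, h1, ih]
      simp [loopA]

-- ===== VERDICT (by name: the statement is the Claim_ definition above) =====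
theorem search_spec : Claim_equal_search := by
  intro G _ hPre
  unfold Spec_search search search_alt
  exact outerA_eq_outerB G hPre _ _
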